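-- pv_equiv track=rewrite | github.com/MInD-Laboratory/Pose-Dynamics | src/pose_dynamics/preprocessing.py | find_real_colname
-- ===== SOURCE A (Python) =====
-- from typing import Dict, List, Optional, Tuple
--
-- def find_real_colname(prefix: str, i: int, columns: List[str]) -> Optional[str]:
--     """Find the actual column name for a given prefix and index.
--
--     Handles case-insensitive matching and partial matches.
--
--     Args:
--         prefix: Column prefix (e.g., 'x', 'y', 'prob')
--         i: Landmark index number
--         columns: List of available column names
--
--     Returns:
--         Actual column name if found, None otherwise
--     """
--     target = f"{prefix}{i}".lower()
--     # First try exact match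
--     for col in columns:
--         if col.lower() == target:
--             return col
--     # Then try prefix match
--     for col in columns:
--         if col.lower().startswith(target):
--             return col
--     return None
-- ===== SOURCE B (Python) =====
-- from typing import List, Optional
--
-- def find_real_colname(prefix: str, i: int, columns: List[str]) -> Optional[str]:
--     target = f"{prefix}{i}".lower()
--     fallback = None
--     for col in columns:
--         low = col.lower()
--         if low == target:
--             return col
--         if fallback is None and low.startswith(target):
--             fallback = col
--     return fallback
-- ===== Notes on version B (the rewrite author's own statement) =====
-- stated objective: simpler
-- what changed: Replaces A's two sequential scans (exact match, then prefix match) with a single pass that returns on an exact match immediately and keeps the first prefix match as a fallback accumulator, lowercasing each column only once.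
import Mathlib
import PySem

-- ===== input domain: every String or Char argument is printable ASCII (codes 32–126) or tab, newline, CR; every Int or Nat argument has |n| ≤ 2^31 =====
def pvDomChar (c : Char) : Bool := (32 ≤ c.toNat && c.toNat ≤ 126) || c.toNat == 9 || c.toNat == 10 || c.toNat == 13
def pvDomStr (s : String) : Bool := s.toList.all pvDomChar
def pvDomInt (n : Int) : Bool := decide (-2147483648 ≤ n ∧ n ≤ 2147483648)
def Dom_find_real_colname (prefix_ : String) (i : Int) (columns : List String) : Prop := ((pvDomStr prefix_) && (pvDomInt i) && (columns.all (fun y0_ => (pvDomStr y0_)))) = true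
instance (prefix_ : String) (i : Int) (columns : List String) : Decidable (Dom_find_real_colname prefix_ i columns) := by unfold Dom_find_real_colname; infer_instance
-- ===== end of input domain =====

-- B merges A's two sequential scans into one pass that returns an exact match immediately
-- and keeps the first prefix match as a fallback accumulator (objective: simpler — one pass,
-- one lowercasing per column, instead of two tiered scans).

-- ===== PORT A =====
-- first loop of A: first column whose lowercase equals target
def frcExact (target : String) : List String → Option String
  | [] => none
  | col :: rest =>
    if PySem.Str.lower col == target then some col else frcExact target rest

-- second loop of A: first column whose lowercase starts with target
def frcPrefix (target : String) : List String → Option String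
  | [] => none
  | col :: rest =>
    if PySem.Str.startswith (PySem.Str.lower col) target then some col
    else frcPrefix target rest

def find_real_colname (prefix_ : String) (i : Int) (columns : List String) : Option String :=
  let target := PySem.Str.lower (prefix_ ++ PySem.Int.toStr i)
  match frcExact target columns with
  | some col => some col
  | none => frcPrefix target columns

-- ===== PORT B =====
-- single loop of B with the fallback accumulator
def frcAltLoop (target : String) : List String → Option String → Option String
  | [], fallback => fallback
  | col :: rest, fallback =>
    let low := PySem.Str.lower col
    if low == target then some col
    else if fallback.isNone && PySem.Str.startswith low target then
      frcAltLoop target rest (some col)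
    else frcAltLoop target rest fallback

def find_real_colname_alt (prefix_ : String) (i : Int) (columns : List String) : Option String :=
  frcAltLoop (PySem.Str.lower (prefix_ ++ PySem.Int.toStr i)) columns none

-- ===== PRECONDITION & SPEC =====
def Spec_find_real_colname (prefix_ : String) (i : Int) (columns : List String) (out : Option String) : Prop := out = find_real_colname_alt prefix_ i columns
instance (prefix_ : String) (i : Int) (columns : List String) (out : Option String) : Decidable (Spec_find_real_colname prefix_ i columns out) := by unfold Spec_find_real_colname; infer_instance

-- ===== CLAIM (what is proved, stated in full; the proofs are below) =====
def Claim_equal_find_real_colname : Prop := ∀ (prefix_ : String) (i : Int) (columns : List String), Dom_find_real_colname prefix_ i columns → Spec_find_real_colname prefix_ i columns (find_real_colname prefix_ i columns)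

-- ===== LEMMAS AND PROOFS =====

-- B's loop equals: exact match if any, else the fallback if already saved, else A's prefix scan
theorem frcAltLoop_eq (t : String) (cols : List String) : ∀ fb : Option String,
    frcAltLoop t cols fb =
      match frcExact t cols, fb with
      | some c, _ => some c
      | none, some a => some a
      | none, none => frcPrefix t cols := by
  induction cols with
  | nil => intro fb; cases fb <;> simp [frcAltLoop, frcExact, frcPrefix]
  | cons c cs ih =>
    intro fb
    simp only [frcAltLoop, frcExact, frcPrefix]
    by_cases h1 : (PySem.Str.lower c == t) = true
    · simp [h1]
    · cases fb with
      | some a =>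
        simp [h1, ih]
        cases frcExact t cs <;> simp
      | none =>
        by_cases h2 : PySem.Chars.startswith (PySem.Chars.lower c.toList) t.toList = true
        · simp [h1, h2, ih]
          cases frcExact t cs <;> simp
        · simp [h1, h2, ih]

-- ===== VERDICT (by name: the statement is the Claim_ definition above) =====
theorem find_real_colname_spec : Claim_equal_find_real_colname := by
  intro prefix_ i columns _
  unfold Spec_find_real_colname find_real_colname find_real_colname_alt
  rw [frcAltLoop_eq]
  cases hfe : frcExact (PySem.Str.lower (prefix_ ++ PySem.Int.toStr i)) columns <;> simp [hfe]
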